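-- pv_equiv track=rewrite | github.com/N1kitaSolovyov/AOIS | lab2/minimization.py | _covers_generic
-- ===== SOURCE A (Python) =====
-- from typing import Dict, List, Optional, Sequence, Set, Tuple
--
-- def _covers_generic(
--     imp: str,
--     source_bits: Sequence[str],
--     source_numbers: Sequence[int],
-- ) -> Set[int]:
--     covered: Set[int] = set()
--
--     for num, term in zip(source_numbers, source_bits):
--         if all(imp[i] == '-' or imp[i] == term[i] for i in range(len(imp))):
--             covered.add(num)
--
--     return covered
-- ===== SOURCE B (Python) =====
-- def _covers_generic(imp, source_bits, source_numbers):
--     # Staged filtering (loop interchange): start with all (num, term) candidates and,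
--     # for each fixed (non-'-') position of the implicant in ascending order, make one
--     # pass that keeps only the candidates whose term matches at that position.
--     candidates = list(zip(source_numbers, source_bits))
--     for i, c in enumerate(imp):
--         if c != '-':
--             candidates = [(num, term) for num, term in candidates if term[i] == c]
--     return {num for num, _ in candidates}
-- ===== Notes on version B (the rewrite author's own statement) =====
-- stated objective: alternative
-- what changed: B inverts the loop nesting: instead of testing each term against the whole implicant, it starts from all (num, term) candidates and makes one filtering pass over the surviving candidates per fixed (non-'-') position of the implicant, collecting the numbers of the survivors at the end.
import Mathlib
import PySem

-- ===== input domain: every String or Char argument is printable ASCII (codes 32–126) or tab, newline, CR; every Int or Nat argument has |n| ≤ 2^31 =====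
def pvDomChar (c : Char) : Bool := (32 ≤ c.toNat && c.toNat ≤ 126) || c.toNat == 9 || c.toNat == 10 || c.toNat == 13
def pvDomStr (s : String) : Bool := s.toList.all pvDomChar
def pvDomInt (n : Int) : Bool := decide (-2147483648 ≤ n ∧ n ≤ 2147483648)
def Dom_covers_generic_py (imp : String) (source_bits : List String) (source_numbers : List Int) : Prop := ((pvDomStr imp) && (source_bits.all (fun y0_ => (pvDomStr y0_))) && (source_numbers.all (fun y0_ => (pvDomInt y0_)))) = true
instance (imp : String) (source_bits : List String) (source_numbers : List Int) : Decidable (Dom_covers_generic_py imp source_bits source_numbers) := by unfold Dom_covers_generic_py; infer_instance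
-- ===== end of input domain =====

-- B replaces A's per-term wildcard test by staged filtering: one pass over the candidate list per fixed position of the implicant (loop interchange, alternative decomposition).


-- ===== PORT A =====
-- the generator 'all(imp[i] == '-' or imp[i] == term[i] for i in range(len(imp)))', short-circuiting;
-- i < len(imp) always, so imp[i] is getD (exact); term[i] is pyGet? — none = IndexError (A raises there)
def chkA (imp term : List Char) : List Nat → Option Bool
  | [] => some true
  | i :: rest =>
    if imp.getD i ' ' = '-' then chkA imp term rest
    else match PySem.List.pyGet? term (i : Int) with
      | none => none
      | some t => if imp.getD i ' ' = t then chkA imp term rest else some false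

def covers_generic_py (imp : String) (source_bits : List String) (source_numbers : List Int) : List Int :=
  (List.zip source_numbers source_bits).foldl (fun covered p =>
    match chkA imp.toList p.2.toList (List.range imp.toList.length) with
    | some true => PySem.Set.add covered p.1
    | some false => covered
    | none => covered)   -- IndexError in Python: unreachable under Pre_covers_generic_py
    PySem.Set.empty

-- ===== PORT B =====
-- one stage: '[(num, term) for num, term in candidates if term[i] == c]';
-- term[i] is pyGet? — none = IndexError (B raises there too)
def stageFilter (i : Int) (c : Char) : List (Int × String) → Option (List (Int × String))
  | [] => some []
  | p :: rest =>
    match PySem.List.pyGet? p.2.toList i with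
    | none => none
    | some t =>
      if t = c then (stageFilter i c rest).map (p :: ·)
      else stageFilter i c rest

def covers_generic_py_alt (imp : String) (source_bits : List String) (source_numbers : List Int) : List Int :=
  -- 'for i, c in enumerate(imp): if c != '-': candidates = [...]'
  let final := (PySem.List.enumerate imp.toList 0).foldl
    (fun st q =>
      if q.2 ≠ '-' then
        match st with
        | none => none
        | some cands => stageFilter q.1 q.2 cands
      else st)
    (some (List.zip source_numbers source_bits))
  match final with
  | none => []   -- IndexError in Python: unreachable under Pre_covers_generic_py
  | some cands => cands.foldl (fun s p => PySem.Set.add s p.1) PySem.Set.empty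

-- ===== PRECONDITION & SPEC =====
-- Pre_ excludes exactly the inputs where Python A raises IndexError: some zipped term is too
-- short at a fixed position of imp that is not preceded by an already-failing fixed position.
def Pre_covers_generic_py (imp : String) (source_bits : List String) (source_numbers : List Int) : Prop :=
  ∀ term ∈ source_bits.take source_numbers.length, ∀ i ∈ List.range imp.toList.length,
    imp.toList.getD i ' ' ≠ '-' → term.toList.length ≤ i →
    ∃ j ∈ List.range i, imp.toList.getD j ' ' ≠ '-' ∧ j < term.toList.length ∧
      imp.toList.getD j ' ' ≠ term.toList.getD j ' '
instance (imp : String) (source_bits : List String) (source_numbers : List Int) : Decidable (Pre_covers_generic_py imp source_bits source_numbers) := by unfold Pre_covers_generic_py; infer_instance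

def pvWitness_covers_generic_py : String × List String × List Int := ("1-0", ["100", "110", "010"], [4, 6, 2])

def Spec_covers_generic_py (imp : String) (source_bits : List String) (source_numbers : List Int) (out : List Int) : Prop := out = covers_generic_py_alt imp source_bits source_numbers
instance (imp : String) (source_bits : List String) (source_numbers : List Int) (out : List Int) : Decidable (Spec_covers_generic_py imp source_bits source_numbers out) := by unfold Spec_covers_generic_py; infer_instance

-- ===== CLAIM (what is proved, stated in full; the proofs are below) =====
def Claim_equal_covers_generic_py : Prop := ∀ (imp : String) (source_bits : List String) (source_numbers : List Int), Dom_covers_generic_py imp source_bits source_numbers → Pre_covers_generic_py imp source_bits source_numbers → Spec_covers_generic_py imp source_bits source_numbers (covers_generic_py imp source_bits source_numbers)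

-- ===== LEMMAS AND PROOFS =====

-- proof-side per-term check over a list of fixed positions (used only to relate the two ports)
def chkB (term : List Char) : List (Int × Char) → Option Bool
  | [] => some true
  | (i, c) :: rest =>
    match PySem.List.pyGet? term i with
    | none => none
    | some t => if t = c then chkB term rest else some false

-- enumerate as a map over range (with a default the in-range lookups never see)
theorem enum_eq_map_range {α : Type} (d : α) : ∀ (xs : List α) (s : Int),
    PySem.List.enumerate xs s
      = (List.range xs.length).map (fun (i : Nat) => (s + (i : Int), xs.getD i d))
  | [], _ => by simp [PySem.List.enumerate_nil]
  | x :: xs, s => by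
    rw [PySem.List.enumerate_cons, enum_eq_map_range d xs (s + 1)]
    simp only [List.length_cons, List.range_succ_eq_map, List.map_cons, List.map_map]
    refine congrArg₂ _ (by simp) (List.map_congr_left ?_)
    intro j _
    simp [Function.comp]
    omega

-- the two per-term checks agree: A over an index list = B over its fixed-position filtrate
theorem chk_rel (imp term : List Char) : ∀ (is : List Nat),
    chkA imp term is
      = chkB term ((is.map (fun (i : Nat) => ((i : Int), imp.getD i ' '))).filter (fun p => p.2 ≠ '-'))
  | [] => rfl
  | i :: rest => by
    simp only [chkA, List.map_cons, List.filter_cons]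
    by_cases h : imp.getD i ' ' = '-'
    · simp only [h]
      simp [chk_rel imp term rest]
    · rw [if_neg h]
      have hd : (decide (((i : Int), imp.getD i ' ').2 ≠ '-')) = true := by
        simpa using h
      rw [if_pos hd]
      simp only [chkB]
      cases PySem.List.pyGet? term (i : Int) with
      | none => rfl
      | some t =>
        dsimp only
        by_cases ht : imp.getD i ' ' = t
        · rw [if_pos ht, if_pos ht.symm]
          exact chk_rel imp term rest
        · rw [if_neg ht, if_neg (fun h' => ht h'.symm)]

theorem chk_main (imp term : List Char) :
    chkA imp term (List.range imp.length)
      = chkB term ((PySem.List.enumerate imp 0).filter (fun p => p.2 ≠ '-')) := by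
  rw [enum_eq_map_range ' ' imp 0, chk_rel imp term (List.range imp.length)]
  simp

-- where chkA over a contiguous index block raises: first fixed position the term is short at,
-- with every earlier fixed position present and matching
theorem chkA_range'_none (imp term : List Char) :
    ∀ (m s : Nat), chkA imp term (List.range' s m) = none →
      ∃ i, s ≤ i ∧ i < s + m ∧ imp.getD i ' ' ≠ '-' ∧ term.length ≤ i ∧
        (∀ j, s ≤ j → j < i → imp.getD j ' ' ≠ '-' →
          j < term.length ∧ imp.getD j ' ' = term.getD j ' ') := by
    intro m
    induction m with
    | zero => intro s h; simp [chkA] at h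
    | succ m ih =>
      intro s h
      rw [List.range'_succ] at h
      simp only [chkA] at h
      by_cases hf : imp.getD s ' ' = '-'
      · rw [if_pos hf] at h
        obtain ⟨i, h1, h2, h3, h4, h5⟩ := ih (s + 1) h
        refine ⟨i, by omega, by omega, h3, h4, ?_⟩
        intro j hj1 hj2 hjf
        rcases Nat.eq_or_lt_of_le hj1 with rfl | hlt
        · exact absurd hf hjf
        · exact h5 j hlt hj2 hjf
      · rw [if_neg hf] at h
        cases hg : PySem.List.pyGet? term (s : Int) with
        | none =>
          have hlen : term.length ≤ s := by
            rw [PySem.List.pyGet?_natCast] at hg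
            exact List.getElem?_eq_none_iff.mp hg
          exact ⟨s, le_refl s, by omega, hf, hlen, fun j hj1 hj2 _ => by omega⟩
        | some t =>
          rw [hg] at h
          dsimp only at h
          by_cases ht : imp.getD s ' ' = t
          · rw [if_pos ht] at h
            rw [PySem.List.pyGet?_natCast] at hg
            obtain ⟨hlen, hval⟩ := List.getElem?_eq_some_iff.mp hg
            obtain ⟨i, h1, h2, h3, h4, h5⟩ := ih (s + 1) h
            refine ⟨i, by omega, by omega, h3, h4, ?_⟩
            intro j hj1 hj2 hjf
            rcases Nat.eq_or_lt_of_le hj1 with rfl | hlt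
            · exact ⟨hlen, by rw [ht, List.getD_eq_getElem _ _ hlen, hval]⟩
            · exact h5 j hlt hj2 hjf
          · rw [if_neg ht] at h
            exact absurd h (by simp)

theorem chkA_ne_none_of_pre (imp term : List Char)
    (h : ∀ i ∈ List.range imp.length, imp.getD i ' ' ≠ '-' → term.length ≤ i →
         ∃ j ∈ List.range i, imp.getD j ' ' ≠ '-' ∧ j < term.length ∧
           imp.getD j ' ' ≠ term.getD j ' ') :
    chkA imp term (List.range imp.length) ≠ none := by
    intro hn
    rw [List.range_eq_range'] at hn
    obtain ⟨i, _, h2, h3, h4, h5⟩ := chkA_range'_none imp term imp.length 0 hn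
    obtain ⟨j, hjm, hjf, hjl, hjne⟩ :=
      h i (List.mem_range.mpr (by omega)) h3 h4
    exact hjne (h5 j (Nat.zero_le j) (List.mem_range.mp hjm) hjf).2

theorem snd_mem_take_of_mem_zip {α β : Type} :
    ∀ {a : List α} {b : List β} {p : α × β}, p ∈ List.zip a b → p.2 ∈ b.take a.length := by
    intro a
    induction a with
    | nil => intro b p h; simp [List.zip] at h
    | cons x xs ih =>
      intro b p h
      cases b with
      | nil => simp [List.zip] at h
      | cons y ys =>
        simp only [List.zip_cons_cons, List.mem_cons] at h
        simp only [List.length_cons, List.take_succ_cons, List.mem_cons]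
        rcases h with rfl | h'
        · exact Or.inl rfl
        · exact Or.inr (ih h')

-- one stage succeeds and is an honest filter when no surviving term is short at that position
theorem stageFilter_eq (i : Int) (c : Char) :
    ∀ (L : List (Int × String)), (∀ p ∈ L, PySem.List.pyGet? p.2.toList i ≠ none) →
      stageFilter i c L
        = some (L.filter (fun p =>
            match PySem.List.pyGet? p.2.toList i with
            | none => false
            | some t => t == c)) := by
    intro L
    induction L with
    | nil => intro _; rfl
    | cons p rest ih =>
      intro h
      have hp := h p (List.mem_cons_self ..)
      simp only [stageFilter, List.filter_cons]
      cases hg : PySem.List.pyGet? p.2.toList i with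
      | none => exact absurd hg hp
      | some t =>
        rw [ih (fun q hq => h q (List.mem_cons_of_mem _ hq))]
        by_cases ht : t = c
        · simp [ht]
        · simp [ht]

-- the staged fold over the fixed positions is the per-term filter by chkB
theorem staged (fixed : List (Int × Char)) :
    ∀ (L : List (Int × String)), (∀ p ∈ L, chkB p.2.toList fixed ≠ none) →
      fixed.foldl (fun st q =>
          match st with
          | none => none
          | some cands => stageFilter q.1 q.2 cands) (some L)
        = some (L.filter (fun p => chkB p.2.toList fixed == some true)) := by
    induction fixed with
    | nil =>
      intro L _
      simp [chkB]
    | cons q rest ih =>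
      obtain ⟨i, c⟩ := q
      intro L h
      simp only [List.foldl_cons]
      have hget : ∀ p ∈ L, PySem.List.pyGet? p.2.toList i ≠ none := by
        intro p hp hnone
        apply h p hp
        simp [chkB, hnone]
      rw [stageFilter_eq i c L hget]
      have hrest : ∀ p ∈ L.filter (fun p =>
          match PySem.List.pyGet? p.2.toList i with
          | none => false
          | some t => t == c), chkB p.2.toList rest ≠ none := by
        intro p hp
        have hmem := List.mem_of_mem_filter hp
        have hq := List.of_mem_filter hp
        cases hg : PySem.List.pyGet? p.2.toList i with
        | none => rw [hg] at hq; simp at hq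
        | some t =>
          rw [hg] at hq
          simp only [beq_iff_eq] at hq
          have hnone := h p hmem
          simpa [chkB, hg, hq] using hnone
      rw [ih _ hrest]
      congr 1
      rw [List.filter_filter]
      apply List.filter_congr
      intro p _
      cases hg : PySem.List.pyGet? p.2.toList i with
      | none => simp [chkB, hg]
      | some t =>
        by_cases ht : t = c
        · simp [chkB, hg, ht]
        · simp [chkB, hg, ht]

-- A's accumulate-if-covered fold is the fold of Set.add over the filtered list
theorem foldA_filter (imp : String) :
    ∀ (L : List (Int × String)) (acc : List Int),
      L.foldl (fun covered p =>
        match chkA imp.toList p.2.toList (List.range imp.toList.length) with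
        | some true => PySem.Set.add covered p.1
        | some false => covered
        | none => covered) acc
      = (L.filter (fun p =>
          chkA imp.toList p.2.toList (List.range imp.toList.length) == some true)).foldl
          (fun s p => PySem.Set.add s p.1) acc := by
    intro L
    induction L with
    | nil => intro acc; rfl
    | cons p rest ih =>
      intro acc
      simp only [List.foldl_cons, List.filter_cons]
      cases hc : chkA imp.toList p.2.toList (List.range imp.toList.length) with
      | none => simpa using ih acc
      | some b =>
        cases b with
        | true => simpa using ih (PySem.Set.add acc p.1)
        | false => simpa using ih acc

-- ===== VERDICT (by name: the statement is the Claim_ definition above) =====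
theorem covers_generic_py_spec : Claim_equal_covers_generic_py := by
  intro imp source_bits source_numbers _ hpre
  unfold Spec_covers_generic_py covers_generic_py covers_generic_py_alt
  have hne : ∀ p ∈ List.zip source_numbers source_bits,
      chkB p.2.toList ((PySem.List.enumerate imp.toList 0).filter (fun q => decide (q.2 ≠ '-'))) ≠ none := by
    intro p hp
    rw [← chk_main]
    apply chkA_ne_none_of_pre
    exact hpre p.2 (snd_mem_take_of_mem_zip hp)
  rw [PySem.List.foldl_ite_eq_foldl_filter]
  rw [staged _ _ hne]
  rw [foldA_filter]
  congr 1
  apply List.filter_congr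
  intro p _
  rw [chk_main]
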